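-- pv_equiv track=rewrite | github.com/ilir-b17/AI-Prototype | src/core/orchestrator.py | _is_user_profile_lookup_question
-- ===== SOURCE A (Python) =====
-- def _is_user_profile_lookup_question(lowered: str) -> bool:
--     return any(
--         phrase in lowered
--         for phrase in (
--             "do you know my name",
--             "can you tell my name",
--             "tell my name",
--             "tell me my name",
--             "what is my name",
--             "what's my name",
--             "who am i",
--             "do you know my age",
--             "how old am i",
--         )
--     )
-- ===== SOURCE B (Python) =====
-- _PHRASES = (
--     "do you know my name",
--     "can you tell my name",
--     "tell my name",
--     "tell me my name",
--     "what is my name",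
--     "what's my name",
--     "who am i",
--     "do you know my age",
--     "how old am i",
-- )
--
--
-- def _is_user_profile_lookup_question(lowered: str) -> bool:
--     # One left-to-right pass over the string: at each position, check whether
--     # some phrase starts there, instead of nine independent substring scans.
--     for i in range(len(lowered) + 1):
--         suffix = lowered[i:]
--         if any(suffix.startswith(p) for p in _PHRASES):
--             return True
--     return False
-- ===== Notes on version B (the rewrite author's own statement) =====
-- stated objective: alternative
-- what changed: Replaces nine independent substring-containment scans (one per phrase) with a single left-to-right pass over the string's positions, testing at each position whether any phrase starts there.
import Mathlib
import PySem

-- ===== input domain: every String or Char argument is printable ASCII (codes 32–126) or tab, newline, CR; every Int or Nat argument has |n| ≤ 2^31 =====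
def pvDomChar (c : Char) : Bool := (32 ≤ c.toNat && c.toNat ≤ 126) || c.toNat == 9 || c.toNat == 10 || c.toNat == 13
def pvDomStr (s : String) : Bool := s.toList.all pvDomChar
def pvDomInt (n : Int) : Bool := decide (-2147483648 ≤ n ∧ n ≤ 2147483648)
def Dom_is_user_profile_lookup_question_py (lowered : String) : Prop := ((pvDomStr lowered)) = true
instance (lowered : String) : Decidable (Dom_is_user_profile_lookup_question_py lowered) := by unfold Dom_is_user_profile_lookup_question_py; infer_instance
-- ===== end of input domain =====

-- B replaces A's nine independent substring scans by a single pass over the string's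
-- positions, testing at each position whether some phrase starts there (objective: alternative).

-- ===== PORT A =====
-- A: any(phrase in lowered for phrase in (...))
def is_user_profile_lookup_question_py (lowered : String) : Bool :=
  ["do you know my name",
   "can you tell my name",
   "tell my name",
   "tell me my name",
   "what is my name",
   "what's my name",
   "who am i",
   "do you know my age",
   "how old am i"].any (fun phrase => PySem.Str.isIn phrase lowered)

-- ===== PORT B =====
-- the module-level tuple _PHRASES, as lists of code points
def pvPhrases : List (List Char) :=
  ["do you know my name".toList,
   "can you tell my name".toList,
   "tell my name".toList,
   "tell me my name".toList,
   "what is my name".toList,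
   "what's my name".toList,
   "who am i".toList,
   "do you know my age".toList,
   "how old am i".toList]

-- the loop 'for i in range(len(lowered)+1): suffix = lowered[i:]; if any(suffix.startswith(p)...)':
-- structural recursion over the successive suffixes of the string
def pvAltGo : List Char → Bool
  | [] => pvPhrases.any (fun p => PySem.Chars.startswith [] p)
  | c :: rest =>
    if pvPhrases.any (fun p => PySem.Chars.startswith (c :: rest) p) then true
    else pvAltGo rest

def is_user_profile_lookup_question_py_alt (lowered : String) : Bool :=
  pvAltGo lowered.toList

-- ===== PRECONDITION & SPEC =====
def Spec_is_user_profile_lookup_question_py (lowered : String) (out : Bool) : Prop := out = is_user_profile_lookup_question_py_alt lowered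
instance (lowered : String) (out : Bool) : Decidable (Spec_is_user_profile_lookup_question_py lowered out) := by unfold Spec_is_user_profile_lookup_question_py; infer_instance

-- ===== CLAIM (what is proved, stated in full; the proofs are below) =====
def Claim_equal_is_user_profile_lookup_question_py : Prop := ∀ (lowered : String), Dom_is_user_profile_lookup_question_py lowered → Spec_is_user_profile_lookup_question_py lowered (is_user_profile_lookup_question_py lowered)

-- ===== LEMMAS AND PROOFS =====

-- B's scan is true iff some phrase is a prefix of some suffix
theorem pvAltGo_eq_true_iff (s : List Char) :
    pvAltGo s = true ↔ ∃ p ∈ pvPhrases, ∃ j, p <+: s.drop j := by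
  induction s with
  | nil =>
    simp only [pvAltGo, List.any_eq_true, PySem.Chars.startswith_iff, List.drop_nil]
    exact ⟨fun ⟨p, hp, h⟩ => ⟨p, hp, 0, h⟩, fun ⟨p, hp, _, h⟩ => ⟨p, hp, h⟩⟩
  | cons c rest ih =>
    simp only [pvAltGo]
    split_ifs with h
    · simp only [List.any_eq_true, PySem.Chars.startswith_iff] at h
      obtain ⟨p, hp, hpre⟩ := h
      exact iff_of_true rfl ⟨p, hp, 0, hpre⟩
    · simp only [List.any_eq_true, PySem.Chars.startswith_iff, not_exists, not_and] at h
      rw [ih]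
      constructor
      · rintro ⟨p, hp, j, hj⟩
        exact ⟨p, hp, j + 1, by simpa using hj⟩
      · rintro ⟨p, hp, j, hj⟩
        cases j with
        | zero => exact absurd (by simpa using hj) (h p hp)
        | succ j => exact ⟨p, hp, j, by simpa using hj⟩

-- ===== VERDICT (by name: the statement is the Claim_ definition above) =====
theorem is_user_profile_lookup_question_py_spec : Claim_equal_is_user_profile_lookup_question_py := by
  intro lowered _
  unfold Spec_is_user_profile_lookup_question_py
  rw [Bool.eq_iff_iff]
  unfold is_user_profile_lookup_question_py is_user_profile_lookup_question_py_alt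
  rw [pvAltGo_eq_true_iff]
  simp only [List.any_eq_true, PySem.Str.isIn_eq]
  constructor
  · rintro ⟨phrase, hmem, hin⟩
    refine ⟨phrase.toList, ?_, ?_⟩
    · fin_cases hmem <;> simp [pvPhrases]
    · exact (PySem.Chars.exists_prefix_drop_iff_isIn _ _).2 hin
  · rintro ⟨p, hp, hdrop⟩
    have hin := (PySem.Chars.exists_prefix_drop_iff_isIn p lowered.toList).1 hdrop
    fin_cases hp
    · exact ⟨"do you know my name", by simp, by simpa using hin⟩
    · exact ⟨"can you tell my name", by simp, by simpa using hin⟩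
    · exact ⟨"tell my name", by simp, by simpa using hin⟩
    · exact ⟨"tell me my name", by simp, by simpa using hin⟩
    · exact ⟨"what is my name", by simp, by simpa using hin⟩
    · exact ⟨"what's my name", by simp, by simpa using hin⟩
    · exact ⟨"who am i", by simp, by simpa using hin⟩
    · exact ⟨"do you know my age", by simp, by simpa using hin⟩
    · exact ⟨"how old am i", by simp, by simpa using hin⟩
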